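-- pv_equiv track=rewrite | github.com/danielewhughes/dissertation | evaluators/singability/rhyme_analyser.py | check_partial_match
-- ===== SOURCE A (Python) =====
-- def check_partial_match(ref, test):
--     index_map_ref = {}
--     for index, char in enumerate(ref):
--         if index_map_ref.get(char):
--             index_map_ref[char].append(index)
--         else:
--             index_map_ref[char] = [index]
--     index_map_test = {}
--     for x, ch in enumerate(test):
--         if index_map_test.get(ch):
--             index_map_test[ch].append(x)
--         else:
--             index_map_test[ch] = [x]
--
--     for indices in index_map_ref.values():
--         if len(indices) > 1:
--             if indices in index_map_test.values():
--                 return True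
--
--     return False
-- ===== SOURCE B (Python) =====
-- def check_partial_match(ref, test):
--     index_map_ref = {}
--     for i, ch in enumerate(ref):
--         index_map_ref.setdefault(ch, []).append(i)
--     n = len(test)
--     for indices in index_map_ref.values():
--         if len(indices) > 1 and indices[0] < n:
--             cand = test[indices[0]]
--             if [i for i, c in enumerate(test) if c == cand] == indices:
--                 return True
--     return False
-- ===== Notes on version B (the rewrite author's own statement) =====
-- stated objective: alternative
-- what changed: B builds only ref's char->indices map and, for each repeated-char index list, probes test directly (reads test at the list's first index and rescans test for that one character) instead of pre-building test's full index map and comparing against all of its values.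
import Mathlib
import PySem

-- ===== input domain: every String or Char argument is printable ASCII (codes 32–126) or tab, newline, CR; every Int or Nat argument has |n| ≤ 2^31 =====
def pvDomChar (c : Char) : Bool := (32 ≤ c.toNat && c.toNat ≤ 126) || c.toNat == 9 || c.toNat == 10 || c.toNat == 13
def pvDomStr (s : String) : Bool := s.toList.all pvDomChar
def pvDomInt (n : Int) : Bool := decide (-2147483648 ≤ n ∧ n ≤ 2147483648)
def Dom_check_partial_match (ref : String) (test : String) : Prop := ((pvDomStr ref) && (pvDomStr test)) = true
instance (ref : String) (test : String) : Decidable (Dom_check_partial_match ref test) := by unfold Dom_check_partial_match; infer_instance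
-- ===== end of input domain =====

-- B replaces A's second full index map of `test` by a direct probe of `test` per repeated-char
-- index list of `ref` (alternative decomposition; return values proved equal everywhere).

-- ===== PORT A =====
-- char -> list of indices, built exactly as A's loop (get-truthiness check, append or fresh list)
def pvBuildA (cs : List Char) : PySem.Dict Char (List Int) :=
  (PySem.List.enumerate cs).foldl
    (fun d p =>
      if ((d.get? p.2).getD []) ≠ [] then d.modify p.2 [] (fun l => l ++ [p.1])
      else d.insert p.2 [p.1])
    PySem.Dict.empty

def check_partial_match (ref : String) (test : String) : Bool :=
  let index_map_ref := pvBuildA ref.toList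
  let index_map_test := pvBuildA test.toList
  index_map_ref.values.any (fun indices =>
    decide (1 < indices.length) && index_map_test.values.contains indices)

-- ===== PORT B =====
-- char -> list of indices via setdefault(ch, []).append(i)  (= d[ch] = d.get(ch, []) + [i])
def pvBuildB (cs : List Char) : PySem.Dict Char (List Int) :=
  (PySem.List.enumerate cs).foldl
    (fun d p => d.modify p.2 [] (fun l => l ++ [p.1]))
    PySem.Dict.empty

def check_partial_match_alt (ref : String) (test : String) : Bool :=
  let index_map_ref := pvBuildB ref.toList
  let ts := test.toList
  let n : Int := ts.length
  index_map_ref.values.any (fun indices =>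
    decide (1 < indices.length) &&
    match PySem.List.pyGet? indices 0 with
    | none => false
    | some h =>
      decide (h < n) &&
      match PySem.List.pyGet? ts h with
      | none => false
      | some cand =>
        ((PySem.List.enumerate ts).filterMap
          (fun p => if p.2 == cand then some p.1 else none)) == indices)

-- ===== PRECONDITION & SPEC =====
def Spec_check_partial_match (ref : String) (test : String) (out : Bool) : Prop := out = check_partial_match_alt ref test
instance (ref : String) (test : String) (out : Bool) : Decidable (Spec_check_partial_match ref test out) := by unfold Spec_check_partial_match; infer_instance

-- ===== CLAIM (what is proved, stated in full; the proofs are below) =====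
def Claim_equal_check_partial_match : Prop := ∀ (ref : String) (test : String), Dom_check_partial_match ref test → Spec_check_partial_match ref test (check_partial_match ref test)

-- ===== LEMMAS AND PROOFS =====

-- the position list of character c in cs
def pvPosns (cs : List Char) (c : Char) : List Int :=
  ((PySem.List.enumerate cs).filter (fun p => p.2 == c)).map (·.1)

lemma pvMem_enumerate {α : Type} (xs : List α) (s i : Int) (c : α) :
    (i, c) ∈ PySem.List.enumerate xs s ↔
      ∃ k : Nat, k < xs.length ∧ i = s + k ∧ xs[k]? = some c := by
  induction xs generalizing s with
  | nil => simp [PySem.List.enumerate]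
  | cons x t ih =>
    rw [PySem.List.enumerate_cons]
    simp only [List.mem_cons, ih, List.length_cons, Prod.mk.injEq]
    constructor
    · rintro (⟨h1, h2⟩ | ⟨k, hk, hi, hg⟩)
      · exact ⟨0, by omega, by simp [h1], by simp [h2]⟩
      · exact ⟨k + 1, by omega, by push_cast at hi ⊢; omega, by simpa using hg⟩
    · rintro ⟨k, hk, hi, hg⟩
      cases k with
      | zero =>
        simp only [Nat.cast_zero, add_zero] at hi
        simp only [List.getElem?_cons_zero, Option.some.injEq] at hg
        exact Or.inl ⟨hi, hg.symm⟩
      | succ k =>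
        exact Or.inr ⟨k, by omega, by push_cast at hi ⊢; omega, by simpa using hg⟩

lemma pvMem_posns (cs : List Char) (c : Char) (i : Int) :
    i ∈ pvPosns cs c ↔ ∃ k : Nat, k < cs.length ∧ i = (k : Int) ∧ cs[k]? = some c := by
  unfold pvPosns
  simp only [List.mem_map, List.mem_filter, beq_iff_eq]
  constructor
  · rintro ⟨⟨j, d⟩, ⟨hm, hd⟩, hj⟩
    simp only at hd hj
    rcases (pvMem_enumerate cs 0 j d).1 hm with ⟨k, hk, hi, hg⟩
    exact ⟨k, hk, by omega, by rw [← hd]; exact hg⟩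
  · rintro ⟨k, hk, hi, hg⟩
    exact ⟨((k : Int), c), ⟨(pvMem_enumerate cs 0 (k:Int) c).2 ⟨k, hk, by omega, hg⟩, rfl⟩, hi.symm⟩

lemma pvPosns_ne_nil (cs : List Char) (c : Char) (h : c ∈ cs) : pvPosns cs c ≠ [] := by
  rcases List.getElem?_of_mem h with ⟨k, hk⟩
  have hklen : k < cs.length := by
    by_contra hb
    rw [List.getElem?_eq_none (by omega)] at hk
    simp at hk
  have hmem : (k : Int) ∈ pvPosns cs c := (pvMem_posns cs c k).2 ⟨k, hklen, rfl, hk⟩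
  intro hnil
  rw [hnil] at hmem
  simp at hmem

-- the two builds are the same function
lemma pvBuild_eq (cs : List Char) : pvBuildA cs = pvBuildB cs := by
  unfold pvBuildA pvBuildB
  congr 1
  funext d p
  by_cases h : ((d.get? p.2).getD []) ≠ []
  · rw [if_pos h]
  · push Not at h
    simp [h, PySem.Dict.modify, PySem.Dict.getD_eq_get?_getD]

-- values of the built map are the position lists of the distinct characters
lemma pvBuildB_getD (cs : List Char) (c : Char) :
    (pvBuildB cs).getD c [] = pvPosns cs c := by
  unfold pvBuildB
  have hm : (PySem.List.enumerate cs).foldl (fun d p => d.modify p.2 [] (fun l => l ++ [p.1])) PySem.Dict.empty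
      = ((PySem.List.enumerate cs).map (fun p => (p.2, p.1))).foldl
          (fun d q => d.modify q.1 [] (fun l => l ++ [q.2])) PySem.Dict.empty := by
    rw [List.foldl_map]
  rw [hm, PySem.Dict.getD_foldl_modify_append]
  unfold pvPosns
  simp [List.filter_map, List.map_map, Function.comp_def]

lemma pvBuildB_keys (cs : List Char) : (pvBuildB cs).keys = PySem.Set.ofList cs := by
  unfold pvBuildB
  rw [PySem.Dict.keys_foldl_modify_key (PySem.List.enumerate cs) (fun p => p.2) []
       (fun _ p => fun l => l ++ [p.1]) PySem.Dict.empty]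
  simp [PySem.List.map_snd_enumerate, PySem.Dict.keys_empty, PySem.Set.update_nil_left]

lemma pvBuildB_nodup_keys (cs : List Char) : (pvBuildB cs).keys.Nodup := by
  unfold pvBuildB
  exact PySem.Dict.nodup_keys_foldl_modify_key (PySem.List.enumerate cs) (fun p => p.2) []
    (fun _ p => fun l => l ++ [p.1]) PySem.Dict.empty (by simp [PySem.Dict.keys_empty])

lemma pvBuildB_values (cs : List Char) :
    (pvBuildB cs).values = (PySem.Set.ofList cs : List Char).map (fun c => pvPosns cs c) := by
  rw [PySem.Dict.values_eq_map_keys _ (pvBuildB_nodup_keys cs) [], pvBuildB_keys cs]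
  exact List.map_congr_left (fun c _ => pvBuildB_getD cs c)

-- the comprehension in port B is pvPosns
lemma pvFM (l : List (Int × Char)) (cand : Char) :
    l.filterMap (fun p => if p.2 == cand then some p.1 else none)
      = (l.filter (fun p => p.2 == cand)).map (·.1) := by
  induction l with
  | nil => rfl
  | cons p l ih =>
    rcases hb : p.2 == cand with _ | _
    · rw [List.filterMap_cons, List.filter_cons, hb]
      simpa using ih
    · rw [List.filterMap_cons, List.filter_cons, hb]
      simpa using ih

lemma pvComp_eq_posns (ts : List Char) (cand : Char) :
    (PySem.List.enumerate ts).filterMap (fun p => if p.2 == cand then some p.1 else none)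
      = pvPosns ts cand := pvFM (PySem.List.enumerate ts) cand

-- A's membership test among test's value lists equals B's direct probe of test
lemma pvProbe_eq (ts : List Char) (L : List Int) :
    ((PySem.Set.ofList ts : List Char).map (fun c => pvPosns ts c)).contains L =
      (match PySem.List.pyGet? L 0 with
       | none => false
       | some h =>
         decide (h < (ts.length : Int)) &&
         match PySem.List.pyGet? ts h with
         | none => false
         | some cand => pvPosns ts cand == L) := by
  cases L with
  | nil =>
    have h0 : PySem.List.pyGet? ([] : List Int) 0 = none := by
      simpa using PySem.List.pyGet?_natCast ([] : List Int) 0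
    rw [h0]
    simp only [List.contains_eq_mem, decide_eq_false_iff_not, List.mem_map]
    rintro ⟨c, hc, hp⟩
    exact pvPosns_ne_nil ts c ((PySem.Set.mem_ofList ts c).1 hc) hp
  | cons h rest =>
    have h0 : PySem.List.pyGet? (h :: rest) 0 = some h := by
      simp
    rw [h0]
    rw [Bool.eq_iff_iff]
    simp only [List.contains_eq_mem, decide_eq_true_eq, List.mem_map, Bool.and_eq_true,
      decide_eq_true_eq]
    constructor
    · rintro ⟨c, hc, hp⟩
      have hhead : h ∈ pvPosns ts c := by rw [hp]; exact List.mem_cons_self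
      rcases (pvMem_posns ts c h).1 hhead with ⟨k, hk, hi, hg⟩
      have hget : PySem.List.pyGet? ts h = some c := by
        rw [hi, PySem.List.pyGet?_natCast, hg]
      refine ⟨by omega, ?_⟩
      rw [hget]
      simp [hp]
    · rintro ⟨hlt, hrest⟩
      rcases hget : PySem.List.pyGet? ts h with _ | cand
      · rw [hget] at hrest; exact absurd hrest (by simp)
      · rw [hget] at hrest
        have hp : pvPosns ts cand = h :: rest := by simpa using hrest
        have hhead : h ∈ pvPosns ts cand := by rw [hp]; exact List.mem_cons_self
        rcases (pvMem_posns ts cand h).1 hhead with ⟨k, hk, hi, hg⟩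
        refine ⟨cand, (PySem.Set.mem_ofList ts cand).2 ?_, hp⟩
        exact List.mem_of_getElem? hg

-- ===== VERDICT (by name: the statement is the Claim_ definition above) =====
theorem check_partial_match_spec : Claim_equal_check_partial_match := by
  intro ref test _
  show check_partial_match ref test = check_partial_match_alt ref test
  unfold check_partial_match check_partial_match_alt
  dsimp only
  rw [pvBuild_eq ref.toList, pvBuild_eq test.toList]
  congr 1
  funext indices
  congr 1
  rw [pvBuildB_values test.toList, pvProbe_eq test.toList indices]
  cases PySem.List.pyGet? indices 0 with
  | none => rfl
  | some h =>
    dsimp only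
    congr 1
    cases PySem.List.pyGet? test.toList h with
    | none => rfl
    | some cand =>
      dsimp only
      rw [pvComp_eq_posns]
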